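-- pv_equiv track=rewrite | github.com/KingSean27/Coding-Notes | Python - COMP0015 - Q's/Week 3/2. Functions Q3.py | square_line
-- ===== SOURCE A (Python) =====
-- def square_line(min_val, max_val):
--   start_val = min_val
--   line = ""
--   line_number = 0
--   for i in range(min_val, max_val + 1):
--     for i in range(start_val, max_val + 1):
--       line += str(i)
--     for i in range(min_val, min_val + line_number):
--       line += str(i)
--     start_val += 1
--     line_number += 1
--     line += "\n"
--   return line
-- ===== SOURCE B (Python) =====
-- def square_line(min_val, max_val):
--     base = [str(v) for v in range(min_val, max_val + 1)]
--     n = len(base)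
--     parts = []
--     for r in range(n):
--         parts.append(''.join(base[r:] + base[:r]) + '\n')
--     return ''.join(parts)
-- ===== Notes on version B (the rewrite author's own statement) =====
-- stated objective: simpler
-- what changed: Replaces the two nested number-emitting loops by precomputing the base list of digit strings once and producing each line as a left rotation by slicing (base[r:] + base[:r]) joined at the end.
import Mathlib
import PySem

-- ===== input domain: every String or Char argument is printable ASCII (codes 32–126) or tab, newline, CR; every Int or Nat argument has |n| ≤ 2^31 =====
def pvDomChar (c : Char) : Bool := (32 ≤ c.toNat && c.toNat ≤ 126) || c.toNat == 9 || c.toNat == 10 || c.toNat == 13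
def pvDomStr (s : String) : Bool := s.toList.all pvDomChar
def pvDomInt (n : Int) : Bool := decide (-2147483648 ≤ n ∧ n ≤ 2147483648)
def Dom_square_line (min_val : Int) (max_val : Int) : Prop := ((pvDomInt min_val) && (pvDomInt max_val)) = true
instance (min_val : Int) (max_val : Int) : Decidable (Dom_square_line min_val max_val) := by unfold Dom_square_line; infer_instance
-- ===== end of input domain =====

-- B precomputes the base list of digit strings once and emits each line as a
-- left rotation of it by slicing, replacing A's two nested emit-loops (simpler decomposition).


-- ===== PORT A =====
-- literal transliteration: fold over the outer range carrying (start_val, line, line_number)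
def square_line (min_val : Int) (max_val : Int) : String :=
  let st := (PySem.List.pyRange min_val (max_val + 1) 1).foldl
    (fun (s : Int × String × Int) _ =>
      let start_val := s.1
      let line := s.2.1
      let line_number := s.2.2
      let line := (PySem.List.pyRange start_val (max_val + 1) 1).foldl
        (fun l i => l ++ PySem.Int.toStr i) line
      let line := (PySem.List.pyRange min_val (min_val + line_number) 1).foldl
        (fun l i => l ++ PySem.Int.toStr i) line
      (start_val + 1, line ++ "\n", line_number + 1))
    (min_val, "", 0)
  st.2.1

-- ===== PORT B =====
-- base[r:] / base[:r] for a natural index 0 ≤ r ≤ len(base) are exactly drop/take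
def square_line_alt (min_val : Int) (max_val : Int) : String :=
  let base := (PySem.List.pyRange min_val (max_val + 1) 1).map PySem.Int.toStr
  let n := base.length
  String.join ((List.range n).map
    (fun r => String.join (base.drop r ++ base.take r) ++ "\n"))

-- ===== PRECONDITION & SPEC =====
def Spec_square_line (min_val : Int) (max_val : Int) (out : String) : Prop := out = square_line_alt min_val max_val
instance (min_val : Int) (max_val : Int) (out : String) : Decidable (Spec_square_line min_val max_val out) := by unfold Spec_square_line; infer_instance

-- ===== CLAIM (what is proved, stated in full; the proofs are below) =====
def Claim_equal_square_line : Prop := ∀ (min_val : Int) (max_val : Int), Dom_square_line min_val max_val → Spec_square_line min_val max_val (square_line min_val max_val)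

-- ===== LEMMAS AND PROOFS =====

theorem str_join_cons (s : String) (l : List String) :
    String.join (s :: l) = s ++ String.join l := by
  show List.foldl (· ++ ·) s l = s ++ String.join l
  induction l generalizing s with
  | nil => simp [String.join]
  | cons x xs ih =>
      rw [List.foldl_cons, ih (s ++ x),
        show String.join (x :: xs) = List.foldl (· ++ ·) x xs from rfl,
        ih x, String.append_assoc]

theorem str_join_append (u v : List String) :
    String.join (u ++ v) = String.join u ++ String.join v := by
  induction u with
  | nil => simp [String.join]
  | cons x xs ih => simp [str_join_cons, ih, String.append_assoc]

theorem foldl_str (xs : List Int) (L : String) :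
    xs.foldl (fun l i => l ++ PySem.Int.toStr i) L
      = L ++ String.join (xs.map PySem.Int.toStr) := by
  induction xs generalizing L with
  | nil => simp [String.join]
  | cons x t ih => simp [ih, str_join_cons, String.append_assoc]

-- one A-row: the numbers start_val..max_val then min_val..min_val+line_number-1
def rowA (a b : Int) (r : Nat) : String :=
  String.join ((PySem.List.pyRange (a + r) b 1).map PySem.Int.toStr)
    ++ (String.join ((PySem.List.pyRange a (a + r) 1).map PySem.Int.toStr) ++ "\n")

theorem loopA (a b : Int) (m : Nat) (xs : List Int) (k : Nat) (L : String) (hm : xs.length = m) :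
    (xs.foldl
      (fun (s : Int × String × Int) _ =>
        let start_val := s.1
        let line := s.2.1
        let line_number := s.2.2
        let line := (PySem.List.pyRange start_val b 1).foldl
          (fun l i => l ++ PySem.Int.toStr i) line
        let line := (PySem.List.pyRange a (a + line_number) 1).foldl
          (fun l i => l ++ PySem.Int.toStr i) line
        (start_val + 1, line ++ "\n", line_number + 1))
      (a + (k : Int), L, (k : Int))).2.1
    = L ++ String.join ((List.range m).map (fun r => rowA a b (k + r))) := by
  induction m generalizing xs k L with
  | zero =>
      rcases List.length_eq_zero_iff.mp hm with rfl
      simp [String.join]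
  | succ m ih =>
      rcases xs with _ | ⟨x, t⟩
      · simp at hm
      · simp only [List.foldl_cons]
        have ht : t.length = m := by simpa using hm
        have : (a + (k : Int)) + 1 = a + ((k + 1 : Nat) : Int) := by push_cast; ring
        rw [foldl_str, foldl_str]
        have h2 : ((k : Int) + 1) = ((k + 1 : Nat) : Int) := by push_cast; ring
        rw [this, h2, ih t (k + 1) _ ht]
        rw [List.range_succ_eq_map]
        simp only [List.map_cons, List.map_map, str_join_cons]
        have hrow : ∀ r : Nat, rowA a b (k + 1 + r) = rowA a b (k + (r + 1)) := by
          intro r; congr 1; omega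
        simp only [Function.comp_def, hrow]
        simp [rowA, String.append_assoc]

theorem square_line_eq_rows (a b : Int) :
    square_line a (b - 1)
      = String.join ((List.range (b - a).toNat).map (fun r => rowA a b r)) := by
  unfold square_line
  have hb : b - 1 + 1 = b := by ring
  rw [hb]
  have := loopA a b (b - a).toNat (PySem.List.pyRange a b 1) 0 ""
    (by simp [PySem.List.length_pyRange_one])
  simp only [Nat.cast_zero, add_zero] at this
  rw [this]
  simp [String.join]

theorem drop_base (a b : Int) (r : Nat) (hr : (r : Int) ≤ b - a) :
    ((PySem.List.pyRange a b 1).map PySem.Int.toStr).drop r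
      = (PySem.List.pyRange (a + r) b 1).map PySem.Int.toStr := by
  rw [PySem.List.pyRange_one_append a (a + r) b (by omega) (by omega)]
  rw [List.map_append, List.drop_append_of_le_length (by simp [PySem.List.length_pyRange_one])]
  have : ((PySem.List.pyRange a (a + r) 1).map PySem.Int.toStr).length = r := by
    simp [PySem.List.length_pyRange_one]
  simp [this]

theorem take_base (a b : Int) (r : Nat) (hr : (r : Int) ≤ b - a) :
    ((PySem.List.pyRange a b 1).map PySem.Int.toStr).take r
      = (PySem.List.pyRange a (a + r) 1).map PySem.Int.toStr := by
  rw [PySem.List.pyRange_one_append a (a + r) b (by omega) (by omega)]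
  rw [List.map_append, List.take_append_of_le_length (by simp [PySem.List.length_pyRange_one])]
  have : ((PySem.List.pyRange a (a + r) 1).map PySem.Int.toStr).length = r := by
    simp [PySem.List.length_pyRange_one]
  simp [this]

theorem square_line_alt_eq_rows (a b : Int) :
    square_line_alt a (b - 1)
      = String.join ((List.range (b - a).toNat).map (fun r => rowA a b r)) := by
  unfold square_line_alt
  have hb : b - 1 + 1 = b := by ring
  rw [hb]
  show String.join ((List.range ((PySem.List.pyRange a b 1).map PySem.Int.toStr).length).map
      (fun r => String.join (((PySem.List.pyRange a b 1).map PySem.Int.toStr).drop r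
        ++ ((PySem.List.pyRange a b 1).map PySem.Int.toStr).take r) ++ "\n"))
    = String.join ((List.range (b - a).toNat).map (fun r => rowA a b r))
  have hlen : ((PySem.List.pyRange a b 1).map PySem.Int.toStr).length = (b - a).toNat := by
    simp [PySem.List.length_pyRange_one]
  rw [hlen]
  congr 1
  apply List.map_congr_left
  intro r hr
  have hr' : (r : Int) ≤ b - a := by
    have := List.mem_range.mp hr; omega
  rw [drop_base a b r hr', take_base a b r hr', str_join_append, rowA, String.append_assoc]

-- ===== VERDICT (by name: the statement is the Claim_ definition above) =====
theorem square_line_spec : Claim_equal_square_line := by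
  intro a b _
  show square_line a b = square_line_alt a b
  have : b = (b + 1) - 1 := by ring
  rw [this, square_line_eq_rows a (b + 1), square_line_alt_eq_rows a (b + 1)]
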